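-- pv_equiv track=rewrite | github.com/MrBrantCode/unitest_baseline | mut_generate/mist_train_taco/taco_5580/solution.py | find_number_with_max_zeroes
-- ===== SOURCE A (Python) =====
-- def find_number_with_max_zeroes(arr, N):
--     max_zeroes = -1
--     result = -1
--
--     for num in arr:
--         str_num = str(num)
--         zero_count = str_num.count('0')
--
--         if zero_count > max_zeroes:
--             max_zeroes = zero_count
--             result = num
--         elif zero_count == max_zeroes:
--             if num > result:
--                 result = num
--
--     return result
-- ===== SOURCE B (Python) =====
-- def find_number_with_max_zeroes(arr, N):
--     if not arr:
--         return -1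
--     return sorted(arr, key=lambda n: (str(n).count('0'), n))[-1]
-- ===== Notes on version B (the rewrite author's own statement) =====
-- stated objective: alternative
-- what changed: Replaces A's running max/tie-break accumulator loop with a decorate-sort-select pass: sort the list ascending by the lexicographic key (zero-digit count, value) and take the last element, guarding the empty list explicitly.
import Mathlib
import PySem

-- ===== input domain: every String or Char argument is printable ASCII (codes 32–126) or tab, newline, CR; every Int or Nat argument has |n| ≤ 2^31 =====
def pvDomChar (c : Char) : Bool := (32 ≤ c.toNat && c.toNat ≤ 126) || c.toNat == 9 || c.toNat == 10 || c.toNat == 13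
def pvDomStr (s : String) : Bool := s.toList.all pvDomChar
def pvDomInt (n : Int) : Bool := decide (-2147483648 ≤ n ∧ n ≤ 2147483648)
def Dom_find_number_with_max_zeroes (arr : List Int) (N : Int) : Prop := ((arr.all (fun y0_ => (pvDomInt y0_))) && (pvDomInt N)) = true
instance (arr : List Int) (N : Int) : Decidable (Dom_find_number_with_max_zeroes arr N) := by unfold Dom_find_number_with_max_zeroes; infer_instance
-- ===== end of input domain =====

-- B replaces A's running max/tie-break loop by sorting ascending on the key
-- (zero-digit count, value) and taking the last element (alternative decomposition; not faster).

-- ===== PORT A =====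
-- str(num).count('0') as an Int (A compares it with the Int sentinel -1)
def pvZeroes (num : Int) : Int := (PySem.Str.count (PySem.Int.toStr num) "0" : Int)

-- the body of A's for-loop, acting on the state (max_zeroes, result)
def pvStepA (st : Int × Int) (num : Int) : Int × Int :=
  let zero_count := pvZeroes num
  if zero_count > st.1 then (zero_count, num)
  else if zero_count = st.1 then (if num > st.2 then (st.1, num) else st)
  else st

def find_number_with_max_zeroes (arr : List Int) (N : Int) : Int :=
  (arr.foldl pvStepA ((-1 : Int), (-1 : Int))).2

-- ===== PORT B =====
def find_number_with_max_zeroes_alt (arr : List Int) (N : Int) : Int :=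
  if arr = [] then -1
  else
    (PySem.List.pyGet?
      (PySem.List.sorted2 arr (fun n => pvZeroes n) (fun n => n)) (-1)).getD (-1)
    -- the .getD default is unreachable: sorted2 of a nonempty list is nonempty

-- ===== PRECONDITION & SPEC =====
def Spec_find_number_with_max_zeroes (arr : List Int) (N : Int) (out : Int) : Prop := out = find_number_with_max_zeroes_alt arr N
instance (arr : List Int) (N : Int) (out : Int) : Decidable (Spec_find_number_with_max_zeroes arr N out) := by unfold Spec_find_number_with_max_zeroes; infer_instance

-- ===== CLAIM (what is proved, stated in full; the proofs are below) =====
def Claim_equal_find_number_with_max_zeroes : Prop := ∀ (arr : List Int) (N : Int), Dom_find_number_with_max_zeroes arr N → Spec_find_number_with_max_zeroes arr N (find_number_with_max_zeroes arr N)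

-- ===== LEMMAS AND PROOFS =====

-- the strict "before" order sorted2 uses for the key (pvZeroes n, n)
def pvBf (a b : Int) : Bool :=
  decide (pvZeroes a < pvZeroes b) || (!decide (pvZeroes b < pvZeroes a) && decide (a < b))

-- A's loop after the first element: running max w.r.t. pvBf
def pvRun (xs : List Int) (r : Int) : Int :=
  xs.foldl (fun r n => if pvBf r n then n else r) r

theorem pvBf_iff (a b : Int) :
    pvBf a b = true ↔ (pvZeroes a < pvZeroes b ∨ (¬ pvZeroes b < pvZeroes a ∧ a < b)) := by
  unfold pvBf
  generalize pvZeroes a = za; generalize pvZeroes b = zb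
  simp

theorem pvBf_asym (a b : Int) : pvBf a b = true → pvBf b a = false := by
  rw [pvBf_iff, ← Bool.not_eq_true, pvBf_iff]; omega

theorem pvBf_total (a b : Int) : pvBf a b = false → pvBf b a = false → a = b := by
  rw [← Bool.not_eq_true, ← Bool.not_eq_true, pvBf_iff, pvBf_iff]; omega

theorem pvBf_trans' (x y z : Int) : pvBf x y = true → pvBf z y = false → pvBf z x = false := by
  rw [← Bool.not_eq_true, ← Bool.not_eq_true, pvBf_iff, pvBf_iff, pvBf_iff]; omega

theorem pvBf_ntrans (a b c : Int) : pvBf a b = false → pvBf c a = false → pvBf c b = false := by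
  rw [← Bool.not_eq_true, ← Bool.not_eq_true, ← Bool.not_eq_true, pvBf_iff, pvBf_iff, pvBf_iff]
  omega

theorem pvBf_irrefl (a : Int) : pvBf a a = false := by
  rw [← Bool.not_eq_true, pvBf_iff]; omega

theorem pvRun_cons (x : Int) (xs : List Int) (r : Int) :
    pvRun (x :: xs) r = pvRun xs (if pvBf r x then x else r) := rfl

theorem pvStepA_inv (r num : Int) :
    pvStepA (pvZeroes r, r) num =
      (pvZeroes (if pvBf r num then num else r), if pvBf r num then num else r) := by
  have h0 := pvBf_iff r num
  unfold pvStepA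
  simp only [gt_iff_lt]
  split_ifs with h1 h2 h3 h4 h5 <;> simp_all <;> omega

theorem pvStepA_first (a : Int) : pvStepA ((-1 : Int), (-1 : Int)) a = (pvZeroes a, a) := by
  have h0 : (0 : Int) ≤ pvZeroes a := by
    unfold pvZeroes; exact Int.natCast_nonneg _
  unfold pvStepA
  simp only [gt_iff_lt]
  rw [if_pos (by omega : (-1 : Int) < pvZeroes a)]

-- A's fold keeps the invariant st = (pvZeroes r, r)
theorem pvFoldA (xs : List Int) (r : Int) :
    xs.foldl pvStepA (pvZeroes r, r) = (pvZeroes (pvRun xs r), pvRun xs r) := by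
  induction xs generalizing r with
  | nil => rfl
  | cons x xs ih =>
    rw [List.foldl_cons, pvStepA_inv, pvRun_cons]
    exact ih _

theorem pvRun_mem (xs : List Int) (r : Int) : pvRun xs r = r ∨ pvRun xs r ∈ xs := by
  induction xs generalizing r with
  | nil => left; rfl
  | cons x xs ih =>
    rw [pvRun_cons]
    by_cases h : pvBf r x
    · rw [if_pos h]
      rcases ih x with h' | h' <;> simp [h', List.mem_cons]
    · rw [if_neg h]
      rcases ih r with h' | h' <;> simp [h', List.mem_cons]

theorem pvRun_ub (xs : List Int) (r : Int) :
    ∀ y ∈ r :: xs, pvBf (pvRun xs r) y = false := by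
  induction xs generalizing r with
  | nil =>
    intro y hy; simp at hy; rw [hy]
    simpa [pvRun] using pvBf_irrefl r
  | cons x xs ih =>
    intro y hy
    rw [pvRun_cons]
    rcases List.mem_cons.mp hy with rfl | hy'
    · -- y = r
      by_cases h : pvBf y x
      · rw [if_pos h]
        exact pvBf_trans' y x (pvRun xs x) h (ih x x (List.mem_cons_self))
      · rw [if_neg h]
        exact ih y y (List.mem_cons_self)
    · rcases List.mem_cons.mp hy' with rfl | hy''
      · -- y = x
        by_cases h : pvBf r y
        · rw [if_pos h]
          exact ih y y (List.mem_cons_self)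
        · rw [if_neg h]
          have hb : pvBf r y = false := by simpa using h
          exact pvBf_ntrans r y (pvRun xs r) hb (ih r r (List.mem_cons_self))
      · -- y ∈ xs
        by_cases h : pvBf r x
        · rw [if_pos h]; exact ih x y (List.mem_cons_of_mem _ hy'')
        · rw [if_neg h]; exact ih r y (List.mem_cons_of_mem _ hy'')

-- insertBy with pvBf preserves "later elements are not before earlier ones"
theorem pvInsert_pairwise (x : Int) (ys : List Int)
    (h : ys.Pairwise (fun a b => pvBf b a = false)) :
    (PySem.List.insertBy pvBf x ys).Pairwise (fun a b => pvBf b a = false) := by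
  induction ys with
  | nil => simp [PySem.List.insertBy]
  | cons y ys ih =>
    rcases List.pairwise_cons.mp h with ⟨hy, hys⟩
    by_cases hb : pvBf x y
    · rw [show PySem.List.insertBy pvBf x (y :: ys) = x :: y :: ys by
        simp [PySem.List.insertBy, hb]]
      refine List.pairwise_cons.mpr ⟨?_, h⟩
      intro z hz
      rcases List.mem_cons.mp hz with rfl | hz
      · exact pvBf_asym x z hb
      · exact pvBf_trans' x y z hb (hy z hz)
    · rw [show PySem.List.insertBy pvBf x (y :: ys) = y :: PySem.List.insertBy pvBf x ys by
        simp [PySem.List.insertBy, hb]]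
      refine List.pairwise_cons.mpr ⟨?_, ih hys⟩
      intro z hz
      rcases (PySem.List.mem_insertBy pvBf x z ys).mp hz with rfl | hz
      · simpa using hb
      · exact hy z hz

theorem pvSorted_pairwise (xs acc : List Int)
    (h : acc.Pairwise (fun a b => pvBf b a = false)) :
    (xs.foldl (fun acc x => PySem.List.insertBy pvBf x acc) acc).Pairwise
      (fun a b => pvBf b a = false) := by
  induction xs generalizing acc with
  | nil => simpa using h
  | cons x xs ih => exact ih _ (pvInsert_pairwise x acc h)

-- last element of a pairwise-ordered list is an upper bound
theorem pvLast_ub (l : List Int) (hl : l ≠ [])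
    (h : l.Pairwise (fun a b => pvBf b a = false)) :
    ∀ x ∈ l, x = l.getLast hl ∨ pvBf (l.getLast hl) x = false := by
  induction l with
  | nil => exact absurd rfl hl
  | cons y ys ih =>
    rcases List.pairwise_cons.mp h with ⟨hy, hys⟩
    intro x hx
    by_cases hn : ys = []
    · subst hn; simp at hx; simp [hx]
    · rw [List.getLast_cons hn]
      rcases List.mem_cons.mp hx with rfl | hx
      · exact Or.inr (hy _ (List.getLast_mem hn))
      · exact ih hn hys x hx

theorem pvSorted2_eq (arr : List Int) :
    PySem.List.sorted2 arr (fun n => pvZeroes n) (fun n => n) =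
      arr.foldl (fun acc x => PySem.List.insertBy pvBf x acc) [] := rfl

theorem find_number_with_max_zeroes_eq :
    ∀ (arr : List Int) (N : Int),
      find_number_with_max_zeroes arr N = find_number_with_max_zeroes_alt arr N := by
  intro arr N
  cases arr with
  | nil => rfl
  | cons a xs =>
    unfold find_number_with_max_zeroes find_number_with_max_zeroes_alt
    rw [if_neg (List.cons_ne_nil a xs), List.foldl_cons, pvStepA_first, pvFoldA]
    -- now the B side
    set s := PySem.List.sorted2 (a :: xs) (fun n => pvZeroes n) (fun n => n) with hs
    have hperm : s.Perm (a :: xs) := PySem.List.sorted2_perm _ _ _ _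
    have hne : s ≠ [] := by
      intro hnil
      have := hperm.length_eq
      rw [hnil] at this
      simp at this
    have hpw : s.Pairwise (fun a b => pvBf b a = false) := by
      rw [hs, pvSorted2_eq]
      exact pvSorted_pairwise _ _ (List.Pairwise.nil)
    have hget : PySem.List.pyGet? s (-1) = some (s.getLast hne) := by
      rw [PySem.List.pyGet?_neg_one, List.getLast?_eq_getLast_of_ne_nil hne]
    rw [hget, Option.getD_some]
    -- both sides are the pvBf-maximum of a :: xs; conclude by antisymmetry
    set m := pvRun xs a with hm
    set L := s.getLast hne with hL
    have hmMem : m ∈ (a :: xs) := by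
      rcases pvRun_mem xs a with h' | h'
      · rw [hm, h']; exact List.mem_cons_self
      · exact List.mem_cons_of_mem _ h'
    have hLmem : L ∈ (a :: xs) := hperm.mem_iff.mp (List.getLast_mem hne)
    have h1 : pvBf m L = false := pvRun_ub xs a L hLmem
    have h2 : m = L ∨ pvBf L m = false :=
      pvLast_ub s hne hpw m (hperm.mem_iff.mpr hmMem)
    rcases h2 with h2 | h2
    · exact h2
    · exact pvBf_total m L h1 h2

-- ===== VERDICT (by name: the statement is the Claim_ definition above) =====
theorem find_number_with_max_zeroes_spec : Claim_equal_find_number_with_max_zeroes := by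
  intro arr N _
  unfold Spec_find_number_with_max_zeroes
  exact find_number_with_max_zeroes_eq arr N
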